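-- pv_equiv track=rewrite | github.com/Chicone/backup_wine_analysis | gcmswine/classification.py | assign_origin_to_pinot_noir
-- ===== SOURCE A (Python) =====
-- def assign_origin_to_pinot_noir(original_keys, split_burgundy_ns=False):
--     """
--     Map wine sample keys to their corresponding region of origin (Origine).
--
--     This function takes a list of wine sample keys, where the first letter of each key represents
--     a region of origin, and returns a list of corresponding regions ("Origine") for each key.
--
--     Parameters
--     ----------
--     original_keys : list of str
--         A list of strings where each string is a wine sample key. The first letter of each key
--         corresponds to a specific region of origin (e.g., 'C14', 'M08').
--
--     Returns
--     -------
--     origine_keys : list of str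
--         A list of strings where each string is the corresponding region of origin based on the
--         first letter of the key.
--
--     Examples
--     --------
--     >>> original_keys = ['C14', 'M08', 'U08', 'D10', 'X13']
--     >>> assign_origin_to_pinot_noir(original_keys)
--     ['Alsace', 'Neuchatel', 'Californie', 'Beaune', 'Oregon']
--
--     Notes
--     -----
--     The first letter of the key is used to determine the specific region of origin:
--         - 'M', 'N' => Neuchatel (Switzerland)
--         - 'J', 'L' => Genève (Switzerland)
--         - 'H' => Valais (Switzerland)
--         - 'U' => Californie (US)
--         - 'X' => Oregon (US)
--         - 'D', 'E', 'Q', 'P', 'R', 'Z' => Burgundy (France)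
--         - 'C', 'K', 'W', 'Y' => Alsace (France)
--     """
--     # Dictionary to map letters to their specific regions (Origine)
--     letter_to_origine = {
--         # Switzerland
--         'M': 'Neuchâtel',
--         'N': 'Neuchâtel',
--         'J': 'Geneva',
--         'L': 'Geneva',
--         'H': 'Valais',
--
--         # US
--         'U': 'California',
--         'X': 'Oregon',
--
--         # France
--         # 'D': 'Burgundy',
--         # 'E': 'Burgundy',
--         # 'Q': 'Burgundy',
--         # 'P': 'Burgundy',
--         # 'R': 'Burgundy',
--         # 'Z': 'Burgundy',
--         'C': 'Alsace',
--         'K': 'Alsace',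
--         'W': 'Alsace',
--         'Y': 'Alsace'
--     }
--
--     burgundy_north = {'D', 'E', 'Q'}
--     burgundy_south = {'P', 'R', 'Z'}
--
--     origin_keys = []
--     for key in original_keys:
--         first_letter = key[0]
--         if split_burgundy_ns:
--             if first_letter in burgundy_north:
--                 origin_keys.append('Burgundy_North')
--             elif first_letter in burgundy_south:
--                 origin_keys.append('Burgundy_South')
--             elif first_letter in letter_to_origine:
--                 origin_keys.append(letter_to_origine[first_letter])
--             else:
--                 origin_keys.append('Unknown')
--         else:
--             if first_letter in burgundy_north or first_letter in burgundy_south: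
--                 origin_keys.append('Burgundy')
--             elif first_letter in letter_to_origine:
--                 origin_keys.append(letter_to_origine[first_letter])
--             else:
--                 origin_keys.append('Unknown')
--     # # Create a new list by mapping the first letter of each key to its specific "Origine"
--     # origin_keys = [letter_to_origine[key[0]] for key in original_keys]
--
--     return origin_keys
-- ===== SOURCE B (Python) =====
-- def assign_origin_to_pinot_noir(original_keys, split_burgundy_ns=False):
--     # Region-major, staged algorithm: take all first letters up front, start from an
--     # all-'Unknown' result, then for each (letters, region) group rewrite in one pass
--     # the slots whose first letter belongs to the group.  Groups are disjoint, so at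
--     # most one group touches a slot and the result is the per-key classification.
--     firsts = [key[0] for key in original_keys]
--     groups = [('MN', 'Neuchâtel'), ('JL', 'Geneva'), ('H', 'Valais'),
--               ('U', 'California'), ('X', 'Oregon'), ('CKWY', 'Alsace')]
--     if split_burgundy_ns:
--         groups.append(('DEQ', 'Burgundy_North'))
--         groups.append(('PRZ', 'Burgundy_South'))
--     else:
--         groups.append(('DEQPRZ', 'Burgundy'))
--     result = ['Unknown'] * len(firsts)
--     for letters, region in groups:
--         result = [region if c in letters else r for c, r in zip(firsts, result)]
--     return result
-- ===== Notes on version B (the rewrite author's own statement) =====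
-- stated objective: alternative
-- what changed: B is region-major instead of key-major: it extracts all first letters once, initialises the whole result to 'Unknown', then iterates over the disjoint (letters, region) groups, each group rewriting in one zip pass the slots whose first letter it owns -- there is no per-key branch cascade or per-key lookup at all.
import Mathlib
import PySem

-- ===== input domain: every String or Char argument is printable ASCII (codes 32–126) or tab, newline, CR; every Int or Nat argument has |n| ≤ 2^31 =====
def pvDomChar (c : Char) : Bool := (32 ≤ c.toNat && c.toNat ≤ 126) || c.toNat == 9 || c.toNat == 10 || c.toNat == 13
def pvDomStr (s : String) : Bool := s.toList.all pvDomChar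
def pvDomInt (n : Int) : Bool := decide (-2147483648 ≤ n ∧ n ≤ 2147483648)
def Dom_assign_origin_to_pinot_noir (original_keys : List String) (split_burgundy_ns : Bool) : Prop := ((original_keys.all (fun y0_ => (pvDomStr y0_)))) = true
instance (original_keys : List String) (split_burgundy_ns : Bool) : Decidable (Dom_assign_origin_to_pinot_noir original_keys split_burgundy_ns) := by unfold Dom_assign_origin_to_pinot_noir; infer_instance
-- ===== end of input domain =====

-- B is region-major instead of key-major: all first letters are taken once, the result
-- starts as all-'Unknown', and each disjoint letter group rewrites its slots in one pass
-- (alternative decomposition, same O(n) cost).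


-- ===== PORT A =====
-- A's letter_to_origine dict
def pvLetterToOrigine : PySem.Dict Char String := PySem.Dict.ofList
  [('M', "Neuchâtel"), ('N', "Neuchâtel"), ('J', "Geneva"), ('L', "Geneva"), ('H', "Valais"),
   ('U', "California"), ('X', "Oregon"),
   ('C', "Alsace"), ('K', "Alsace"), ('W', "Alsace"), ('Y', "Alsace")]

def pvBurgundyNorth : PySem.Set Char := PySem.Set.ofList ['D', 'E', 'Q']
def pvBurgundySouth : PySem.Set Char := PySem.Set.ofList ['P', 'R', 'Z']

-- the string appended for one first letter (A's if/elif cascade, branch order preserved)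
def pvPickA (split_burgundy_ns : Bool) (first_letter : Char) : String :=
  if split_burgundy_ns then
    if PySem.Set.contains pvBurgundyNorth first_letter then "Burgundy_North"
    else if PySem.Set.contains pvBurgundySouth first_letter then "Burgundy_South"
    else if pvLetterToOrigine.contains first_letter then pvLetterToOrigine.getD first_letter ""
    else "Unknown"
  else
    if PySem.Set.contains pvBurgundyNorth first_letter || PySem.Set.contains pvBurgundySouth first_letter then "Burgundy"
    else if pvLetterToOrigine.contains first_letter then pvLetterToOrigine.getD first_letter ""
    else "Unknown"

def assign_origin_to_pinot_noir (original_keys : List String) (split_burgundy_ns : Bool) : List String :=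
  original_keys.foldl (fun origin_keys key =>
    match PySem.Str.pyGet? key 0 with   -- key[0]; none = IndexError, excluded by Pre_
    | none => origin_keys
    | some first_letter => origin_keys ++ [pvPickA split_burgundy_ns first_letter]) []

-- ===== PORT B =====
-- 'region if c in letters else r' for one (letters, region) group; 'c in letters' is
-- character membership, exact for the single-character c (substring test of length 1)
def pvStepB (letters region : String) (oc : Option Char) (r : String) : String :=
  match oc with
  | none => r                            -- unreachable under Pre_ (key[0] raised earlier)
  | some c => if c ∈ letters.toList then region else r

def pvGroups (split_burgundy_ns : Bool) : List (String × String) :=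
  [("MN", "Neuchâtel"), ("JL", "Geneva"), ("H", "Valais"),
   ("U", "California"), ("X", "Oregon"), ("CKWY", "Alsace")] ++
  (if split_burgundy_ns then [("DEQ", "Burgundy_North"), ("PRZ", "Burgundy_South")]
   else [("DEQPRZ", "Burgundy")])

def assign_origin_to_pinot_noir_alt (original_keys : List String) (split_burgundy_ns : Bool) : List String :=
  let firsts := original_keys.map (fun key => PySem.Str.pyGet? key 0)  -- [key[0] for key in original_keys]
  (pvGroups split_burgundy_ns).foldl
    (fun result lr => List.zipWith (pvStepB lr.1 lr.2) firsts result)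
    (List.replicate firsts.length "Unknown")

-- ===== PRECONDITION & SPEC =====
-- Pre_ excludes only inputs containing an empty key, on which Python A (and B) raise IndexError.
def Pre_assign_origin_to_pinot_noir (original_keys : List String) (split_burgundy_ns : Bool) : Prop :=
  ∀ k ∈ original_keys, k ≠ ""
instance (original_keys : List String) (split_burgundy_ns : Bool) : Decidable (Pre_assign_origin_to_pinot_noir original_keys split_burgundy_ns) := by unfold Pre_assign_origin_to_pinot_noir; infer_instance

def pvWitness_assign_origin_to_pinot_noir : List String × Bool := (["C14", "M08", "U08", "D10", "X13"], false)

def Spec_assign_origin_to_pinot_noir (original_keys : List String) (split_burgundy_ns : Bool) (out : List String) : Prop := out = assign_origin_to_pinot_noir_alt original_keys split_burgundy_ns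
instance (original_keys : List String) (split_burgundy_ns : Bool) (out : List String) : Decidable (Spec_assign_origin_to_pinot_noir original_keys split_burgundy_ns out) := by unfold Spec_assign_origin_to_pinot_noir; infer_instance

-- ===== CLAIM =====
def Claim_equal_assign_origin_to_pinot_noir : Prop := ∀ (original_keys : List String) (split_burgundy_ns : Bool), Dom_assign_origin_to_pinot_noir original_keys split_burgundy_ns → Pre_assign_origin_to_pinot_noir original_keys split_burgundy_ns → Spec_assign_origin_to_pinot_noir original_keys split_burgundy_ns (assign_origin_to_pinot_noir original_keys split_burgundy_ns)

-- ===== LEMMAS AND PROOFS =====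

-- one group pass over a mapped result is a pointwise map
theorem pvZip_map (l reg : String) (fs : List (Option Char)) (g : Option Char → String) :
    List.zipWith (pvStepB l reg) fs (fs.map g)
      = fs.map (fun oc => pvStepB l reg oc (g oc)) := by
  induction fs with
  | nil => rfl
  | cons a fs ih => simp [ih]

-- the whole region-major fold is a single pointwise map over the first letters
theorem pvFoldGroups (gs : List (String × String)) (fs : List (Option Char))
    (g : Option Char → String) :
    gs.foldl (fun result lr => List.zipWith (pvStepB lr.1 lr.2) fs result) (fs.map g)
      = fs.map (fun oc => gs.foldl (fun r lr => pvStepB lr.1 lr.2 oc r) (g oc)) := by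
  induction gs generalizing g with
  | nil => rfl
  | cons lr gs ih => rw [List.foldl_cons, pvZip_map, ih]; rfl

-- per first letter, B's group fold computes exactly A's cascade value
theorem pvPointwise (b : Bool) (c : Char) :
    (pvGroups b).foldl (fun r lr => pvStepB lr.1 lr.2 (some c) r) "Unknown"
      = pvPickA b c := by
  by_cases hc : c ∈ ['M','N','J','L','H','U','X','C','K','W','Y','D','E','Q','P','R','Z']
  · fin_cases hc <;> cases b <;> rfl
  · simp only [List.mem_cons, List.not_mem_nil, or_false, not_or] at hc
    obtain ⟨h1,h2,h3,h4,h5,h6,h7,h8,h9,h10,h11,h12,h13,h14,h15,h16,h17⟩ := hc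
    have hC : pvLetterToOrigine.contains c = false := by
      simp [pvLetterToOrigine, PySem.Dict.ofList, PySem.Dict.update, List.foldl,
        PySem.Dict.contains_insert,
        h1,h2,h3,h4,h5,h6,h7,h8,h9,h10,h11]
    cases b <;>
      simp [pvGroups, pvStepB, pvPickA, pvBurgundyNorth, pvBurgundySouth, List.foldl, hC,
        show "MN".toList = ['M','N'] from rfl, show "JL".toList = ['J','L'] from rfl,
        show "H".toList = ['H'] from rfl, show "U".toList = ['U'] from rfl,
        show "X".toList = ['X'] from rfl, show "CKWY".toList = ['C','K','W','Y'] from rfl,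
        show "DEQ".toList = ['D','E','Q'] from rfl, show "PRZ".toList = ['P','R','Z'] from rfl,
        show "DEQPRZ".toList = ['D','E','Q','P','R','Z'] from rfl,
        h1,h2,h3,h4,h5,h6,h7,h8,h9,h10,h11,h12,h13,h14,h15,h16,h17]

-- a nonempty key has a first letter
theorem pvFirst_exists (k : String) (hk : k ≠ "") : ∃ c, PySem.Str.pyGet? k 0 = some c := by
  cases hl : k.toList with
  | nil => exact absurd (by cases k; simp_all) hk
  | cons c rest => exact ⟨c, by simp [PySem.Str.pyGet?, hl]⟩

-- A's append loop, over keys all having a first letter, is a map of the cascade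
theorem pvFoldA (b : Bool) (ks : List String) (acc : List String)
    (h : ∀ k ∈ ks, k ≠ "") :
    ks.foldl (fun origin_keys key =>
      match PySem.Str.pyGet? key 0 with
      | none => origin_keys
      | some first_letter => origin_keys ++ [pvPickA b first_letter]) acc
    = acc ++ ks.map (fun key =>
        match PySem.Str.pyGet? key 0 with
        | none => "Unknown"
        | some c => pvPickA b c) := by
  induction ks generalizing acc with
  | nil => simp
  | cons k ks ih =>
    obtain ⟨c, hc⟩ := pvFirst_exists k (h k (List.mem_cons_self))
    simp only [List.foldl_cons, List.map_cons, hc]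
    rw [ih _ (fun x hx => h x (List.mem_cons_of_mem _ hx))]
    simp

-- ===== VERDICT =====
theorem assign_origin_to_pinot_noir_spec : Claim_equal_assign_origin_to_pinot_noir := by
  intro ks b _ hpre
  unfold Spec_assign_origin_to_pinot_noir assign_origin_to_pinot_noir assign_origin_to_pinot_noir_alt
  have halt : List.foldl
        (fun result lr => List.zipWith (pvStepB lr.1 lr.2) (ks.map (fun key => PySem.Str.pyGet? key 0)) result)
        (List.replicate (ks.map (fun key => PySem.Str.pyGet? key 0)).length "Unknown") (pvGroups b)
      = (ks.map (fun key => PySem.Str.pyGet? key 0)).map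
          (fun oc => (pvGroups b).foldl (fun r lr => pvStepB lr.1 lr.2 oc r) "Unknown") := by
    rw [show List.replicate (ks.map (fun key => PySem.Str.pyGet? key 0)).length "Unknown"
        = (ks.map (fun key => PySem.Str.pyGet? key 0)).map (fun _ => "Unknown") from by
          rw [List.map_const']]
    exact pvFoldGroups _ _ _
  rw [pvFoldA b ks [] hpre, List.nil_append]
  show _ = List.foldl _ (List.replicate (ks.map (fun key => PySem.Str.pyGet? key 0)).length "Unknown") (pvGroups b)
  rw [halt, List.map_map]
  exact List.map_congr_left (fun k hk => by
    obtain ⟨c, hc⟩ := pvFirst_exists k (hpre k hk)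
    simp only [Function.comp_def]
    rw [hc]
    exact (pvPointwise b c).symm)
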